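-- pv_equiv track=rewrite | github.com/elysia090/Lab | src/utilities/ct_distance_strict.py | neighbor_block_centers
-- ===== SOURCE A (Python) =====
-- from typing import Tuple, List, Dict, Any
--
-- def neighbor_block_centers(coord: Tuple[int,int], T: int, N: int) -> List[Tuple[int,int]]:
--     x, y = coord
--     bx0 = (x // T) * T
--     by0 = (y // T) * T
--     blocks = [(bx0, by0), (bx0+T, by0), (bx0, by0+T), (bx0+T, by0+T)]
--     centers = []
--     seen = set()
--     for bx, by in blocks:
--         if bx >= N: bx = (N-1) - (N-1)%T
--         if by >= N: by = (N-1) - (N-1)%T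
--         cx = min(bx + T//2, N-1)
--         cy = min(by + T//2, N-1)
--         c = (cx, cy)
--         if c not in seen:
--             centers.append(c); seen.add(c)
--     return centers  # ≤4
-- ===== SOURCE B (Python) =====
-- def neighbor_block_centers(coord, T, N):
--     def axis_centers(v):
--         b0 = (v // T) * T
--         out = []
--         for b in (b0, b0 + T):
--             if b >= N:
--                 b = (N - 1) - (N - 1) % T
--             c = min(b + T // 2, N - 1)
--             if c not in out:
--                 out.append(c)
--         return out
--     xs = axis_centers(coord[0])
--     ys = axis_centers(coord[1])
--     return [(cx, cy) for cy in ys for cx in xs]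
-- ===== Notes on version B (the rewrite author's own statement) =====
-- stated objective: alternative
-- what changed: B decomposes the computation per axis: it builds the deduplicated list of x-centers and y-centers independently from the two corners of each axis, then forms the result as the y-outer/x-inner cartesian product, instead of A's single fold over the four corner pairs with a seen-set.
import Mathlib
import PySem

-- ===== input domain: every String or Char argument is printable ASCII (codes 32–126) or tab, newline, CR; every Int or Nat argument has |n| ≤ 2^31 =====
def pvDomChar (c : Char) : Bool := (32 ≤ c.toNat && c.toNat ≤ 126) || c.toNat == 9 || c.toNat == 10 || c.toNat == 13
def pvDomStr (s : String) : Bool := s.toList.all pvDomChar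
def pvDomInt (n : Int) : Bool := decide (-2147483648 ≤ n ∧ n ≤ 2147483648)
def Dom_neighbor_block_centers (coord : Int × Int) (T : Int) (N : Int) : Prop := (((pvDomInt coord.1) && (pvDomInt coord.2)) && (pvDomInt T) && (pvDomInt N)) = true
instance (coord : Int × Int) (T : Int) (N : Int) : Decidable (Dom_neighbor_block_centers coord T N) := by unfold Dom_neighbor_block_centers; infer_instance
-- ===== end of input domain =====

-- B computes the deduplicated per-axis center lists and takes their cartesian product,
-- instead of A's single fold over the four corner pairs with a seen-set (objective: alternative).


-- ===== PORT A =====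
def neighbor_block_centers (coord : Int × Int) (T : Int) (N : Int) : List (Int × Int) :=
  let x := coord.1
  let y := coord.2
  let bx0 := (PySem.Int.floordiv x T) * T
  let by0 := (PySem.Int.floordiv y T) * T
  let blocks : List (Int × Int) := [(bx0, by0), (bx0 + T, by0), (bx0, by0 + T), (bx0 + T, by0 + T)]
  let st := blocks.foldl (fun (st : List (Int × Int) × PySem.Set (Int × Int)) b =>
    let bx := if b.1 ≥ N then (N - 1) - PySem.Int.mod (N - 1) T else b.1
    let by' := if b.2 ≥ N then (N - 1) - PySem.Int.mod (N - 1) T else b.2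
    let cx := min (bx + PySem.Int.floordiv T 2) (N - 1)
    let cy := min (by' + PySem.Int.floordiv T 2) (N - 1)
    let c := (cx, cy)
    if c ∈ st.2 then st else (st.1 ++ [c], PySem.Set.add st.2 c))
    ([], PySem.Set.empty)
  st.1

-- ===== PORT B =====
-- per-axis center list: the two clamped centers of an axis, deduplicated preserving order
def pvAxisCenters (v : Int) (T : Int) (N : Int) : List Int :=
  let b0 := (PySem.Int.floordiv v T) * T
  [b0, b0 + T].foldl (fun out b =>
    let b' := if b ≥ N then (N - 1) - PySem.Int.mod (N - 1) T else b
    let c := min (b' + PySem.Int.floordiv T 2) (N - 1)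
    if c ∈ out then out else out ++ [c]) []

def neighbor_block_centers_alt (coord : Int × Int) (T : Int) (N : Int) : List (Int × Int) :=
  let xs := pvAxisCenters coord.1 T N
  let ys := pvAxisCenters coord.2 T N
  ys.flatMap (fun cy => xs.map (fun cx => (cx, cy)))

-- ===== PRECONDITION & SPEC =====
-- Pre_ excludes exactly T = 0, where Python's x // T raises ZeroDivisionError.
def Pre_neighbor_block_centers (coord : Int × Int) (T : Int) (N : Int) : Prop := T ≠ 0
instance (coord : Int × Int) (T : Int) (N : Int) : Decidable (Pre_neighbor_block_centers coord T N) := by unfold Pre_neighbor_block_centers; infer_instance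
def pvWitness_neighbor_block_centers : (Int × Int) × Int × Int := ((3, 5), 4, 16)

def Spec_neighbor_block_centers (coord : Int × Int) (T : Int) (N : Int) (out : List (Int × Int)) : Prop := out = neighbor_block_centers_alt coord T N
instance (coord : Int × Int) (T : Int) (N : Int) (out : List (Int × Int)) : Decidable (Spec_neighbor_block_centers coord T N out) := by unfold Spec_neighbor_block_centers; infer_instance

-- ===== CLAIM (what is proved, stated in full; the proofs are below) =====
def Claim_equal_neighbor_block_centers : Prop := ∀ (coord : Int × Int) (T : Int) (N : Int), Dom_neighbor_block_centers coord T N → Pre_neighbor_block_centers coord T N → Spec_neighbor_block_centers coord T N (neighbor_block_centers coord T N)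

-- ===== LEMMAS AND PROOFS =====
-- the four-pair seen-set fold over (a,c),(b,c),(a,d),(b,d) equals the product of the deduped axes
lemma pv_key (a b c d : Int) :
    (([((a : Int), (c : Int)), (b, c), (a, d), (b, d)].foldl
      (fun (st : List (Int × Int) × PySem.Set (Int × Int)) p =>
        if p ∈ st.2 then st else (st.1 ++ [p], PySem.Set.add st.2 p))
      ([], PySem.Set.empty)).1)
    = ([c, d].foldl (fun out v => if v ∈ out then out else out ++ [v]) []).flatMap
        (fun cy => ([a, b].foldl (fun out v => if v ∈ out then out else out ++ [v]) []).map
          (fun cx => (cx, cy))) := by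
  by_cases hab : a = b
  · subst hab
    by_cases hcd : c = d
    · subst hcd
      simp [List.foldl, PySem.Set.add, PySem.Set.empty]
    · simp [List.foldl, PySem.Set.add, PySem.Set.empty, Ne.symm hcd, Prod.ext_iff]
  · by_cases hcd : c = d
    · subst hcd
      simp [List.foldl, PySem.Set.add, PySem.Set.empty, hab, Ne.symm hab, Prod.ext_iff]
    · simp [List.foldl, PySem.Set.add, PySem.Set.empty, hab, Ne.symm hab, Ne.symm hcd, Prod.ext_iff]

-- ===== VERDICT (by name: the statement is the Claim_ definition above) =====
theorem neighbor_block_centers_spec : Claim_equal_neighbor_block_centers := by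
  intro coord T N _ _
  unfold Spec_neighbor_block_centers neighbor_block_centers neighbor_block_centers_alt pvAxisCenters
  simp only []
  exact pv_key _ _ _ _
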